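-- pv_equiv track=rewrite | github.com/stong/issho | backend/text_generation.py | overlapped_string_length
-- ===== SOURCE A (Python) =====
-- def overlapped_string_length(s1, s2):
--     if not s1 or not s2:
--         return 0
--     if len(s1) == 1 or len(s2) == 1:
--         return 1 if s2[0] == s1[-1] else 0
--
--     # Trim s1 so it isn't longer than s2
--     if len(s1) > len(s2):
--         s1 = s1[-len(s2):]
--
--     T = compute_back_track_table(s2)  # O(n)
--
--     m = 0
--     i = 0
--     while m + i < len(s1):
--         if s2[i] == s1[m + i]:
--             i += 1
--         else:
--             m += i - T[i]
--             if i > 0: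
--                 i = T[i]
--
--     return i  # Return characters matched
--
-- def compute_back_track_table(s):
--     T = [0] * len(s)
--     cnd = 0
--     T[0] = -1
--     T[1] = 0
--     pos = 2
--     while pos < len(s):
--         if s[pos - 1] == s[cnd]:
--             T[pos] = cnd + 1
--             pos += 1
--             cnd += 1
--         elif cnd > 0:
--             cnd = T[cnd]
--         else:
--             T[pos] = 0
--             pos += 1
--
--     return T
-- ===== SOURCE B (Python) =====
-- def overlapped_string_length(s1, s2):
--     # Direct definition: largest k with suffix(s1, k) == prefix(s2, k).
--     n = min(len(s1), len(s2))
--     for k in range(n, 0, -1):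
--         if s1[len(s1) - k:] == s2[:k]:
--             return k
--     return 0
-- ===== Notes on version B (the rewrite author's own statement) =====
-- stated objective: simpler
-- what changed: Replaced the KMP failure-table scan (helper compute_back_track_table plus the m/i matching loop and the length-1/trim special cases) by a direct countdown over k = min(len(s1),len(s2))..1 that returns the first k with s1[-k:] == s2[:k].
import Mathlib
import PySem

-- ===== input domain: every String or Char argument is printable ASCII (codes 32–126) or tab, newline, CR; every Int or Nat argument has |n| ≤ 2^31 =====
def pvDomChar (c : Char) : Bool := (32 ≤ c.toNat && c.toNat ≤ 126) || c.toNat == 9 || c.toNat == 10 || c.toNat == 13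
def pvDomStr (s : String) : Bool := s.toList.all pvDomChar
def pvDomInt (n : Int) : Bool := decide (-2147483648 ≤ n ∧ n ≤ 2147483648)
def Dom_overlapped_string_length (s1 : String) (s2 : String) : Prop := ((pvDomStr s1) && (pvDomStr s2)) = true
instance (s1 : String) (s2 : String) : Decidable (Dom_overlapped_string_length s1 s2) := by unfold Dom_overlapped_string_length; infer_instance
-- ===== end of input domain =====

-- B replaces A's KMP failure-table algorithm by a direct countdown over candidate
-- overlap lengths (simpler, not faster); equivalence is proved for all inputs.

-- ===== PORT A =====
-- the while loop of compute_back_track_table; `fuel` only totalizes the loop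
-- (2*len(s)+2 is proved sufficient below); every list read the Python performs
-- is in range in the reachable states, so `getD` is exact there.
def btLoop (s : List Char) (T : List Int) (cnd pos fuel : Nat) : List Int :=
  match fuel with
  | 0 => T
  | fuel + 1 =>
    if pos < s.length then
      if s.getD (pos - 1) ' ' = s.getD cnd ' ' then
        btLoop s (T.set pos ((cnd : Int) + 1)) (cnd + 1) (pos + 1) fuel
      else if 0 < cnd then
        btLoop s T (T.getD cnd 0).toNat pos fuel
      else
        btLoop s (T.set pos 0) cnd (pos + 1) fuel
    else T

-- compute_back_track_table (A calls it only with len(s) >= 2)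
def btTable (s : List Char) : List Int :=
  btLoop s (((List.replicate s.length (0 : Int)).set 0 (-1)).set 1 0) 0 2 (2 * s.length + 2)

-- the main while loop of A; `fuel` only totalizes it. In the reachable states
-- m+i-T[i] >= 0 and (i>0 -> T[i] >= 0), so the .toNat conversions are exact.
def kmpLoop (s1p s2 : List Char) (T : List Int) (m i fuel : Nat) : Nat :=
  match fuel with
  | 0 => i
  | fuel + 1 =>
    if m + i < s1p.length then
      if s2.getD i ' ' = s1p.getD (m + i) ' ' then
        kmpLoop s1p s2 T m (i + 1) fuel
      else
        kmpLoop s1p s2 T ((m : Int) + (i : Int) - T.getD i 0).toNat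
          (if 0 < i then (T.getD i 0).toNat else i) fuel
    else i

def overlapped_string_length (s1 : String) (s2 : String) : Int :=
  let l1 := s1.toList
  let l2 := s2.toList
  if l1.length = 0 ∨ l2.length = 0 then 0
  else if l1.length = 1 ∨ l2.length = 1 then
    -- s2[0] == s1[-1] (both nonempty here, so getD is exact)
    if l2.getD 0 ' ' = l1.getD (l1.length - 1) ' ' then 1 else 0
  else
    -- s1 = s1[-len(s2):] when len(s1) > len(s2); exact since 0 < len(s2) <= len(s1)
    let l1' := if l2.length < l1.length then l1.drop (l1.length - l2.length) else l1
    ((kmpLoop l1' l2 (btTable l2) 0 0 (2 * l1'.length + 2) : Nat) : Int)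

-- ===== PORT B =====
-- the for-k-in-range(n,0,-1) countdown of Source B: first k with s1[-k:] == s2[:k]
def altGo (l1 l2 : List Char) (k : Nat) : Int :=
  match k with
  | 0 => 0
  | k' + 1 =>
    if l1.drop (l1.length - (k' + 1)) = l2.take (k' + 1) then ((k' : Int) + 1)
    else altGo l1 l2 k'

def overlapped_string_length_alt (s1 : String) (s2 : String) : Int :=
  altGo s1.toList s2.toList (min s1.toList.length s2.toList.length)

-- ===== PRECONDITION & SPEC =====
def Spec_overlapped_string_length (s1 : String) (s2 : String) (out : Int) : Prop := out = overlapped_string_length_alt s1 s2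
instance (s1 : String) (s2 : String) (out : Int) : Decidable (Spec_overlapped_string_length s1 s2 out) := by unfold Spec_overlapped_string_length; infer_instance

-- ===== CLAIM (what is proved, stated in full; the proofs are below) =====
def Claim_equal_overlapped_string_length : Prop := ∀ (s1 : String) (s2 : String), Dom_overlapped_string_length s1 s2 → Spec_overlapped_string_length s1 s2 (overlapped_string_length s1 s2)

-- ===== LEMMAS AND PROOFS =====

-- "k is an overlap length": last k chars of l1 = first k chars of l2
def MK (l1 l2 : List Char) (k : Nat) : Prop := l1.drop (l1.length - k) = l2.take k

-- "b is a border of w": prefix of length b = suffix of length b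
def IsBorder (w : List Char) (b : Nat) : Prop := b ≤ w.length ∧ w.take b = w.drop (w.length - b)

-- "t is the maximal proper border length of s.take j" (as the Int stored in T)
def BSpec (s : List Char) (j : Nat) (t : Int) : Prop :=
  0 ≤ t ∧ t < (j : Int) ∧ IsBorder (s.take j) t.toNat ∧
    ∀ b : Nat, b < j → IsBorder (s.take j) b → (b : Int) ≤ t

lemma getD_of_lt {α : Type} [Inhabited α] (l : List α) (i : Nat) (d : α) (h : i < l.length) :
    l.getD i d = l[i] := by
  simp [List.getD_eq_getElem?_getD, List.getElem?_eq_getElem h]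

lemma getD_set_ne {α : Type} [Inhabited α] (l : List α) (i j : Nat) (v d : α) (h : i ≠ j) :
    (l.set i v).getD j d = l.getD j d := by
  simp [List.getD_eq_getElem?_getD, List.getElem?_set_ne h]

lemma getD_set_self {α : Type} [Inhabited α] (l : List α) (i : Nat) (v d : α)
    (h : i < l.length) : (l.set i v).getD i d = v := by
  simp [List.getD_eq_getElem?_getD, List.getElem?_set_self h]

lemma isBorder_zero (w : List Char) : IsBorder w 0 := ⟨Nat.zero_le _, by simp⟩

lemma isBorder_snoc (w : List Char) (c : Char) (b : Nat) (hb : b < w.length) :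
    IsBorder (w ++ [c]) (b + 1) ↔ (IsBorder w b ∧ w.getD b c = c) := by
  have h1 : (w ++ [c]).take (b + 1) = w.take (b + 1) :=
    List.take_append_of_le_length (by omega)
  have h2 : (w ++ [c]).drop ((w ++ [c]).length - (b + 1)) = w.drop (w.length - b) ++ [c] := by
    have e : (w ++ [c]).length - (b + 1) = w.length - b := by
      simp only [List.length_append, List.length_cons, List.length_nil]
      omega
    rw [e, List.drop_append_of_le_length (by omega)]
  have h3 : w.take (b + 1) = w.take b ++ [w[b]] := by
    rw [List.take_add_one, List.getElem?_eq_getElem hb, Option.toList_some]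
  constructor
  · rintro ⟨-, he⟩
    rw [h1, h3, h2] at he
    obtain ⟨e1, e2⟩ := List.append_inj' he (by simp)
    have hcb : w[b] = c := by simpa using e2
    refine ⟨⟨by omega, ?_⟩, ?_⟩
    · have e : w.length - b = w.length - b := rfl
      exact e1
    · rw [getD_of_lt _ _ _ hb, hcb]
  · rintro ⟨⟨-, he⟩, hc⟩
    refine ⟨by simp; omega, ?_⟩
    rw [h1, h3, h2, ← he]
    have hcb : w[b] = c := by rw [getD_of_lt _ _ _ hb] at hc; exact hc
    rw [hcb]

lemma border_trans {w : List Char} {b c : Nat} (hc : IsBorder w c) (hb : IsBorder (w.take c) b) :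
    IsBorder w b := by
  obtain ⟨hcl, hce⟩ := hc
  obtain ⟨hbl, hbe⟩ := hb
  have hlt : (w.take c).length = c := by simp; omega
  rw [hlt] at hbl hbe
  refine ⟨by omega, ?_⟩
  calc w.take b = (w.take c).take b := by rw [List.take_take]; congr 1; omega
    _ = (w.take c).drop (c - b) := hbe
    _ = (w.drop (w.length - c)).drop (c - b) := by rw [hce]
    _ = w.drop (w.length - b) := by rw [List.drop_drop]; congr 1; omega

lemma border_restrict {w : List Char} {b c : Nat} (hb : IsBorder w b) (hc : IsBorder w c)
    (hbc : b ≤ c) : IsBorder (w.take c) b := by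
  obtain ⟨hbl, hbe⟩ := hb
  obtain ⟨hcl, hce⟩ := hc
  have hlt : (w.take c).length = c := by simp; omega
  refine ⟨by omega, ?_⟩
  rw [hlt]
  calc (w.take c).take b = w.take b := by rw [List.take_take]; congr 1; omega
    _ = w.drop (w.length - b) := hbe
    _ = (w.drop (w.length - c)).drop (c - b) := by rw [List.drop_drop]; congr 1; omega
    _ = (w.take c).drop (c - b) := by rw [hce]

lemma altGo_eq (l1 l2 : List Char) : ∀ (k r : Nat), r ≤ k → MK l1 l2 r →
    (∀ j, r < j → j ≤ k → ¬ MK l1 l2 j) → altGo l1 l2 k = (r : Int) := by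
  intro k
  induction k with
  | zero =>
    intro r hr _ _
    have : r = 0 := by omega
    subst this
    simp [altGo]
  | succ k ih =>
    intro r hr hm hmax
    by_cases h : l1.drop (l1.length - (k + 1)) = l2.take (k + 1)
    · have hrk : r = k + 1 := by
        by_contra hne
        exact hmax (k + 1) (by omega) (le_refl _) h
      subst hrk
      simp [altGo, h]
    · have hr' : r ≤ k := by
        rcases Nat.eq_or_lt_of_le hr with he | hlt
        · exact absurd (he ▸ hm) h
        · omega
      simp only [altGo, if_neg h]
      exact ih r hr' hm (fun j h1 h2 => hmax j h1 (by omega))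

lemma btLoop_inv (s : List Char) : ∀ (fuel : Nat) (T : List Int) (cnd pos : Nat),
    T.length = s.length →
    T.getD 0 0 = -1 →
    (∀ j, 0 < j → j < pos → j < s.length → BSpec s j (T.getD j 0)) →
    2 ≤ pos → cnd + 1 < pos →
    IsBorder (s.take (pos - 1)) cnd →
    (∀ b, cnd < b → b < pos - 1 → IsBorder (s.take (pos - 1)) b →
      s.getD b ' ' ≠ s.getD (pos - 1) ' ') →
    2 * (s.length - pos) + cnd < fuel →
    (btLoop s T cnd pos fuel).getD 0 0 = -1 ∧
    (∀ j, 0 < j → j < s.length → BSpec s j ((btLoop s T cnd pos fuel).getD j 0)) := by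
  intro fuel
  induction fuel with
  | zero =>
    intro T cnd pos _ _ _ _ _ _ _ hfuel
    omega
  | succ fuel ih =>
    intro T cnd pos hlen h0 hprev hpos2 hcp hcb hchain hfuel
    rw [btLoop]
    by_cases hpl : pos < s.length
    · have hc1 : pos - 1 < s.length := by omega
      have hc2 : cnd < s.length := by omega
      have hlt1 : (s.take (pos - 1)).length = pos - 1 := by simp; omega
      have hsp : s.take pos = s.take (pos - 1) ++ [s.getD (pos - 1) ' '] := by
        have e : pos - 1 + 1 = pos := by omega
        conv_lhs => rw [← e, List.take_add_one]
        rw [List.getElem?_eq_getElem hc1, Option.toList_some, getD_of_lt _ _ _ hc1]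
      by_cases heq : s.getD (pos - 1) ' ' = s.getD cnd ' '
      · rw [if_pos hpl, if_pos heq]
        -- the new border fact: cnd+1 is the maximal proper border of s.take pos
        have hnewB : IsBorder (s.take pos) (cnd + 1) := by
          rw [hsp]
          refine (isBorder_snoc _ _ _ (by omega)).mpr ⟨hcb, ?_⟩
          rw [getD_of_lt _ _ _ (by omega), List.getElem_take, ← getD_of_lt s cnd ' ' hc2, ← heq]
        have hnewMax : ∀ b, b < pos → IsBorder (s.take pos) b → (b : Int) ≤ (cnd : Int) + 1 := by
          intro b hblt hbB
          match b with
          | 0 => omega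
          | b' + 1 =>
            rw [hsp] at hbB
            obtain ⟨hbB', hbc⟩ := (isBorder_snoc _ _ b' (by omega)).mp hbB
            by_contra hgt
            have hb'c : cnd < b' := by omega
            refine hchain b' hb'c (by omega) hbB' ?_
            rw [getD_of_lt _ _ _ (by omega), List.getElem_take] at hbc
            rw [getD_of_lt s b' ' ' (by omega)]
            exact hbc
        apply ih
        · simp [hlen]
        · rw [getD_set_ne _ _ _ _ _ (by omega)]; exact h0
        · intro j hj hjp hjl
          rcases Nat.lt_or_ge j pos with hjlt | hjge
          · rw [getD_set_ne _ _ _ _ _ (by omega)]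
            exact hprev j hj hjlt hjl
          · have hje : j = pos := by omega
            subst hje
            rw [getD_set_self _ _ _ _ (by omega)]
            refine ⟨by omega, by push_cast; omega, ?_, ?_⟩
            · have e : ((cnd : Int) + 1).toNat = cnd + 1 := by omega
              rw [e]; exact hnewB
            · exact hnewMax
        · omega
        · omega
        · have e : pos + 1 - 1 = pos := by omega
          rw [e]; exact hnewB
        · intro b hb1 hb2 hbB _
          have e : pos + 1 - 1 = pos := by omega
          rw [e] at hbB hb2
          have := hnewMax b hb2 hbB
          omega
        · omega
      · by_cases hc0 : 0 < cnd
        · rw [if_pos hpl, if_neg heq, if_pos hc0]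
          obtain ⟨ht0, htlt, htb, htmax⟩ := hprev cnd hc0 (by omega) hc2
          have htn : (T.getD cnd 0).toNat < cnd := by omega
          apply ih
          · exact hlen
          · exact h0
          · exact fun j hj hjp hjl => hprev j hj hjp hjl
          · omega
          · omega
          · refine border_trans hcb ?_
            have e : (s.take (pos - 1)).take cnd = s.take cnd := by
              rw [List.take_take]; congr 1; omega
            rw [e]; exact htb
          · intro b hb1 hb2 hbB
            rcases lt_trichotomy b cnd with hlt | hcnd | hgt
            · exfalso
              have hres : IsBorder (s.take cnd) b := by
                have e : (s.take (pos - 1)).take cnd = s.take cnd := by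
                  rw [List.take_take]; congr 1; omega
                rw [← e]
                exact border_restrict hbB hcb (by omega)
              have := htmax b hlt hres
              omega
            · subst hcnd
              exact fun h => heq h.symm
            · exact hchain b hgt hb2 hbB
          · omega
        · rw [if_pos hpl, if_neg heq, if_neg hc0]
          have hcnd0 : cnd = 0 := by omega
          subst hcnd0
          have hnewMax : ∀ b, b < pos → IsBorder (s.take pos) b → (b : Int) ≤ 0 := by
            intro b hblt hbB
            match b with
            | 0 => omega
            | b' + 1 =>
              rw [hsp] at hbB
              obtain ⟨hbB', hbc⟩ := (isBorder_snoc _ _ b' (by omega)).mp hbB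
              exfalso
              rw [getD_of_lt _ _ _ (by omega), List.getElem_take] at hbc
              rcases Nat.eq_zero_or_pos b' with hb0 | hbpos
              · subst hb0
                refine heq ?_
                rw [← getD_of_lt s 0 ' ' (by omega)] at hbc
                exact hbc.symm
              · refine hchain b' hbpos (by omega) hbB' ?_
                rw [getD_of_lt s b' ' ' (by omega)]
                exact hbc
          apply ih
          · simp [hlen]
          · rw [getD_set_ne _ _ _ _ _ (by omega)]; exact h0
          · intro j hj hjp hjl
            rcases Nat.lt_or_ge j pos with hjlt | hjge
            · rw [getD_set_ne _ _ _ _ _ (by omega)]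
              exact hprev j hj hjlt hjl
            · have hje : j = pos := by omega
              subst hje
              rw [getD_set_self _ _ _ _ (by omega)]
              exact ⟨le_refl _, by push_cast; omega, isBorder_zero _, hnewMax⟩
          · omega
          · omega
          · have e : pos + 1 - 1 = pos := by omega
            rw [e]; exact isBorder_zero _
          · intro b hb1 hb2 hbB _
            have e : pos + 1 - 1 = pos := by omega
            rw [e] at hbB hb2
            have := hnewMax b hb2 hbB
            omega
          · omega
    · rw [if_neg hpl]
      exact ⟨h0, fun j hj hjl => hprev j hj (by omega) hjl⟩

lemma btTable_spec (s : List Char) (hs : 2 ≤ s.length) :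
    (btTable s).getD 0 0 = -1 ∧
    (∀ j, 0 < j → j < s.length → BSpec s j ((btTable s).getD j 0)) := by
  unfold btTable
  apply btLoop_inv
  · simp
  · rw [getD_set_ne _ _ _ _ _ (by omega), getD_set_self _ _ _ _ (by simp; omega)]
  · intro j hj hjp _
    have hj1 : j = 1 := by omega
    subst hj1
    rw [getD_set_self _ _ _ _ (by simp; omega)]
    refine ⟨le_refl _, by norm_num, isBorder_zero _, ?_⟩
    intro b hb _
    have : b = 0 := by omega
    subst this
    simp
  · omega
  · omega
  · exact isBorder_zero _
  · intro b hb1 hb2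
    omega
  · omega

lemma kmpLoop_inv (l1 l2 : List Char) (T : List Int)
    (h12 : l1.length ≤ l2.length)
    (hT0 : T.getD 0 0 = -1)
    (hTb : ∀ j, 0 < j → j < l2.length → BSpec l2 j (T.getD j 0)) :
    ∀ (fuel m i : Nat),
      m + i ≤ l1.length →
      l2.take i = (l1.drop m).take i →
      (∀ p, p < m → l1.drop p ≠ l2.take (l1.length - p)) →
      2 * (l1.length - m) - i < fuel →
      kmpLoop l1 l2 T m i fuel ≤ l1.length ∧
      l1.drop (l1.length - kmpLoop l1 l2 T m i fuel) = l2.take (kmpLoop l1 l2 T m i fuel) ∧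
      ∀ j, kmpLoop l1 l2 T m i fuel < j → j ≤ l1.length →
        l1.drop (l1.length - j) ≠ l2.take j := by
  intro fuel
  induction fuel with
  | zero =>
    intro m i hmi _ _ hfuel
    omega
  | succ fuel ih =>
    intro m i hmi hI1 hI2 hfuel
    rw [kmpLoop]
    by_cases hlt : m + i < l1.length
    · have hin2 : i < l2.length := by omega
      by_cases heq : l2.getD i ' ' = l1.getD (m + i) ' '
      · rw [if_pos hlt, if_pos heq]
        apply ih
        · omega
        · rw [List.take_add_one, List.take_add_one, ← hI1]
          congr 1
          rw [List.getElem?_drop, List.getElem?_eq_getElem hin2,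
            List.getElem?_eq_getElem (by omega : m + i < l1.length), Option.toList_some,
            Option.toList_some]
          rw [getD_of_lt _ _ _ hin2, getD_of_lt _ _ _ (by omega : m + i < l1.length)] at heq
          rw [heq]
        · exact hI2
        · omega
      · rw [if_pos hlt, if_neg heq]
        have keyM : ¬ (l1.drop m = l2.take (l1.length - m)) := by
          intro hcon
          refine heq ?_
          have h1 : l1[m + i]? = l2[i]? := by
            rw [← List.getElem?_drop, hcon, List.getElem?_take_of_lt (by omega)]
          rw [List.getD_eq_getElem?_getD, List.getD_eq_getElem?_getD, h1]
        by_cases hi0 : 0 < i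
        · rw [if_pos hi0]
          obtain ⟨ht0, hti, htb, htmax⟩ := hTb i hi0 hin2
          have htn : (T.getD i 0).toNat < i := by omega
          set tn := (T.getD i 0).toNat with htns
          have harith : ((m : Int) + (i : Int) - T.getD i 0).toNat = m + (i - tn) := by omega
          rw [harith]
          have hlti : (l2.take i).length = i := by simp; omega
          apply ih
          · omega
          · -- l2.take tn = (l1.drop (m + (i - tn))).take tn
            have e1 : l1.drop (m + (i - tn)) = (l1.drop m).drop (i - tn) := by
              rw [List.drop_drop]
            have e2 : ((l1.drop m).drop (i - tn)).take tn = ((l1.drop m).take i).drop (i - tn) := by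
              rw [List.drop_take]
              congr 1
              omega
            rw [e1, e2, ← hI1]
            obtain ⟨-, htbe⟩ := htb
            rw [hlti] at htbe
            rw [← htbe, List.take_take]
            congr 1
            omega
          · intro p hp
            rcases lt_trichotomy p m with hpm | hpm | hpm
            · exact hI2 p hpm
            · subst hpm; exact keyM
            · intro hcon
              set k := p - m with hks
              have hk1 : 0 < k := by omega
              have hk2 : k < i - tn := by omega
              have hcut : l2.take (i - k) = (l2.take i).drop k := by
                have c1 : (l1.drop p).take (i - k) = ((l1.drop m).take i).drop k := by
                  have e1 : l1.drop p = (l1.drop m).drop k := by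
                    rw [List.drop_drop]; congr 1; omega
                  rw [e1, List.drop_take]
                have c2 : (l1.drop p).take (i - k) = l2.take (i - k) := by
                  rw [hcon, List.take_take]
                  congr 1
                  omega
                rw [← c2, c1, ← hI1]
              have hbord : IsBorder (l2.take i) (i - k) := by
                refine ⟨by omega, ?_⟩
                rw [List.take_take, hlti]
                have e : min (i - k) i = i - k := by omega
                rw [e, hcut]
                congr 1
                omega
              have := htmax (i - k) (by omega) hbord
              omega
          · omega
        · rw [if_neg hi0]
          have hi : i = 0 := by omega
          subst hi
          have harith : ((m : Int) + (0 : Nat) - T.getD 0 0).toNat = m + 1 := by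
            rw [hT0]; omega
          rw [harith]
          apply ih
          · omega
          · simp
          · intro p hp
            rcases Nat.lt_or_ge p m with hpm | hpm
            · exact hI2 p hpm
            · have : p = m := by omega
              subst this
              exact keyM
          · omega
    · rw [if_neg hlt]
      have hmn : m + i = l1.length := by omega
      refine ⟨by omega, ?_, ?_⟩
      · have h1 : l1.length - i = m := by omega
        rw [h1]
        have h2 : (l1.drop m).take i = l1.drop m := List.take_of_length_le (by simp; omega)
        rw [← h2, ← hI1]
      · intro j hji hjn
        have h := hI2 (l1.length - j) (by omega)
        have e : l1.length - (l1.length - j) = j := by omega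
        rw [e] at h
        exact h

-- ===== VERDICT (by name: the statement is the Claim_ definition above) =====
theorem overlapped_string_length_spec : Claim_equal_overlapped_string_length := by
  unfold Claim_equal_overlapped_string_length
  intro s1 s2 _
  unfold Spec_overlapped_string_length overlapped_string_length overlapped_string_length_alt
  dsimp only
  set l1 := s1.toList with hl1d
  set l2 := s2.toList with hl2d
  by_cases h0 : l1.length = 0 ∨ l2.length = 0
  · rw [if_pos h0]
    have hmin : min l1.length l2.length = 0 := by rcases h0 with h | h <;> omega
    rw [hmin]
    rfl
  · push_neg at h0
    obtain ⟨h01, h02⟩ := h0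
    by_cases h1 : l1.length = 1 ∨ l2.length = 1
    · rw [if_neg (by push_neg; exact ⟨h01, h02⟩), if_pos h1]
      have hmin : min l1.length l2.length = 1 := by
        rcases h1 with h | h <;> omega
      rw [hmin]
      have hlt1 : l1.length - 1 < l1.length := by omega
      have hlt2 : 0 < l2.length := by omega
      have e1 : l1.drop (l1.length - 1) = [l1.getD (l1.length - 1) ' '] := by
        rw [List.drop_eq_getElem_cons hlt1, getD_of_lt _ _ _ hlt1,
          show l1.length - 1 + 1 = l1.length by omega, List.drop_length]
      have e2 : l2.take 1 = [l2.getD 0 ' '] := by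
        rw [List.take_one, List.head?_eq_getElem?, List.getElem?_eq_getElem hlt2,
          Option.toList_some, getD_of_lt _ _ _ hlt2]
      simp only [altGo, e1, e2]
      by_cases hc : l2.getD 0 ' ' = l1.getD (l1.length - 1) ' '
      · rw [if_pos hc, if_pos (by rw [hc])]
        norm_num
      · rw [if_neg hc, if_neg (by simpa [eq_comm] using hc)]
    · rw [if_neg (by push_neg; exact ⟨h01, h02⟩), if_neg h1]
      push_neg at h1
      have h2l : 2 ≤ l1.length ∧ 2 ≤ l2.length := by omega
      set l1' := if l2.length < l1.length then l1.drop (l1.length - l2.length) else l1 with hl1'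
      have hlen' : l1'.length = min l1.length l2.length := by
        rw [hl1']
        split_ifs with h <;> simp <;> omega
      obtain ⟨hbt0, hbtb⟩ := btTable_spec l2 (by omega)
      have h12 : l1'.length ≤ l2.length := by omega
      have hres := kmpLoop_inv l1' l2 (btTable l2) h12 hbt0 hbtb (2 * l1'.length + 2) 0 0
        (by omega) (by simp) (fun p hp => absurd hp (Nat.not_lt_zero p)) (by omega)
      set r := kmpLoop l1' l2 (btTable l2) 0 0 (2 * l1'.length + 2) with hr
      obtain ⟨hrle, hmk, hmax⟩ := hres
      have htr : ∀ j, j ≤ l1'.length → l1'.drop (l1'.length - j) = l1.drop (l1.length - j) := by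
        intro j hj
        rw [hlen'] at hj
        rw [hl1']
        split_ifs with h
        · rw [List.drop_drop]
          congr 1
          simp only [List.length_drop]
          omega
        · rfl
      have haltr : altGo l1 l2 (min l1.length l2.length) = (r : Int) := by
        apply altGo_eq
        · omega
        · show l1.drop (l1.length - r) = l2.take r
          rw [← htr r hrle]
          exact hmk
        · intro j hjr hjmin hmkj
          refine hmax j hjr (by omega) ?_
          have hmkj' : l1.drop (l1.length - j) = l2.take j := hmkj
          rw [← htr j (by omega)] at hmkj'
          exact hmkj'
      exact haltr.symm
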